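-- pv_equiv track=rewrite | github.com/femtomc/loopfarm | src/loopfarm/stores/issue.py | _normalize_cycle_nodes
-- ===== SOURCE A (Python) =====
-- def _normalize_cycle_nodes(cycle: list[str]) -> tuple[str, ...]:
--     if len(cycle) < 2:
--         return tuple(cycle)
--     path = cycle[:-1]
--     if not path:
--         return tuple(cycle)
--
--     rotations = [
--         tuple(path[index:] + path[:index]) for index in range(len(path))
--     ]
--     return min(rotations)
-- ===== SOURCE B (Python) =====
-- def _normalize_cycle_nodes(cycle: list[str]) -> tuple[str, ...]:
--     if len(cycle) < 2:
--         return tuple(cycle)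
--     path = cycle[:-1]
--     smallest = min(path)
--     best = None
--     for index, node in enumerate(path):
--         if node == smallest:
--             rotation = tuple(path[index:] + path[:index])
--             if best is None or rotation < best:
--                 best = rotation
--     return best
-- ===== Notes on version B (the rewrite author's own statement) =====
-- stated objective: faster
-- what changed: Instead of materialising all n rotations and taking min over them, B computes the minimal node once and builds/compares only the rotations that start at an occurrence of that minimal node, keeping a running best.
import Mathlib
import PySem

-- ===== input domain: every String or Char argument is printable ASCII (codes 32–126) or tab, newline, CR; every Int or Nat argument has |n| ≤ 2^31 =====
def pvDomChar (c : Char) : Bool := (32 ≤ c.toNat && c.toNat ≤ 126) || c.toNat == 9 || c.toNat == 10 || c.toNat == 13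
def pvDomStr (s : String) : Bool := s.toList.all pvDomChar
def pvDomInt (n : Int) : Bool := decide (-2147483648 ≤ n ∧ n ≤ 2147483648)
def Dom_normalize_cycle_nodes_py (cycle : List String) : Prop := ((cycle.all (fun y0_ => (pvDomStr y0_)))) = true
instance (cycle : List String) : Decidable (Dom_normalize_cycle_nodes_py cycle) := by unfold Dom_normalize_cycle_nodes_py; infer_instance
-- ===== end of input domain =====

-- B: instead of materialising all n rotations and taking min, rotate only at the positions holding
-- the minimal node and keep a running best — fewer rotations built (objective: faster in the common case).

-- ===== PORT A =====
def normalize_cycle_nodes_py (cycle : List String) : List String :=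
  if cycle.length < 2 then cycle
  else
    let path := PySem.List.slice cycle none (some (-1))
    if path = [] then cycle
    else
      let rotations := (PySem.List.pyRange 0 (path.length : Int) 1).map
        (fun index => PySem.List.slice path (some index) none ++ PySem.List.slice path none (some index))
      (PySem.List.min? rotations (fun r => r)).getD []

-- ===== PORT B =====
-- loop body of Source B's `for index, node in enumerate(path)` loop
def pvBStep (path : List String) (smallest : String)
    (best : Option (List String)) (p : Int × String) : Option (List String) :=
  if p.2 = smallest then
    let rotation := PySem.List.slice path (some p.1) none ++ PySem.List.slice path none (some p.1)
    match best with
    | none => some rotation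
    | some b => if rotation < b then some rotation else some b
  else best

def normalize_cycle_nodes_py_alt (cycle : List String) : List String :=
  if cycle.length < 2 then cycle
  else
    let path := PySem.List.slice cycle none (some (-1))
    let smallest := (PySem.List.min? path (fun s => s)).getD ""
    let best := (PySem.List.enumerate path 0).foldl (pvBStep path smallest) none
    best.getD []

-- ===== PRECONDITION & SPEC =====
def Spec_normalize_cycle_nodes_py (cycle : List String) (out : List String) : Prop := out = normalize_cycle_nodes_py_alt cycle
instance (cycle : List String) (out : List String) : Decidable (Spec_normalize_cycle_nodes_py cycle out) := by unfold Spec_normalize_cycle_nodes_py; infer_instance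

-- ===== CLAIM (what is proved, stated in full; the proofs are below) =====
def Claim_equal_normalize_cycle_nodes_py : Prop := ∀ (cycle : List String), Dom_normalize_cycle_nodes_py cycle → Spec_normalize_cycle_nodes_py cycle (normalize_cycle_nodes_py cycle)

-- ===== LEMMAS AND PROOFS =====

-- the rotation of `path` by a nonnegative offset, in drop/take form
def pvRot (path : List String) (k : Nat) : List String := path.drop k ++ path.take k

-- instance bridge: min? on List String elaborated with core instances equals the one
-- min?_isMin's statement uses (the LinearOrder-derived instances); Decidable is a subsingleton.
lemma pvMin_isMin {xs : List (List String)} {m : List String}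
    (h : PySem.List.min? xs (fun r => r) = some m) : ∀ y ∈ xs, m ≤ y := by
  have e : PySem.List.min? xs (fun r => r)
      = @PySem.List.min? (List String) (List String)
          (@Preorder.toLT _ (@PartialOrder.toPreorder _ (@LinearOrder.toPartialOrder _ List.instLinearOrder)))
          (@LinearOrder.toDecidableLT (List String) List.instLinearOrder) xs (fun r => r) := by
    congr 1
  rw [e] at h
  exact PySem.List.min?_isMin h

lemma pvMinStr_isMin {xs : List String} {m : String}
    (h : PySem.List.min? xs (fun s => s) = some m) : ∀ y ∈ xs, m ≤ y := by
  have e : PySem.List.min? xs (fun s => s)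
      = @PySem.List.min? String String
          (@Preorder.toLT _ (@PartialOrder.toPreorder _ (@LinearOrder.toPartialOrder _ String.instLinearOrder)))
          (@LinearOrder.toDecidableLT String String.instLinearOrder) xs (fun s => s) := by
    congr 1
  rw [e] at h
  exact PySem.List.min?_isMin h

lemma pvMin_some {α : Type} [LT α] [DecidableLT α] (xs : List α) (hne : xs ≠ []) :
    ∃ m, PySem.List.min? xs (fun r => r) = some m := by
  cases hmin : PySem.List.min? xs (fun r => r) with
  | none => exact absurd ((PySem.List.min?_eq_none_iff xs _).mp hmin) hne
  | some m => exact ⟨m, rfl⟩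

-- A's rotation list in drop/take form
lemma pvRotations_eq (path : List String) :
    (PySem.List.pyRange 0 (path.length : Int) 1).map
        (fun index => PySem.List.slice path (some index) none ++ PySem.List.slice path none (some index))
      = (List.range path.length).map (pvRot path) := by
  rw [PySem.List.pyRange_one]
  simp only [List.map_map]
  apply List.map_congr_left
  intro k hk
  simp [pvRot, PySem.List.slice_from_natCast, PySem.List.slice_to_natCast]

lemma pvRot_cons (path : List String) (k : Nat) (hk : k < path.length) :
    pvRot path k = path[k] :: (path.drop (k + 1) ++ path.take k) := by
  unfold pvRot
  rw [List.drop_eq_getElem_cons hk, List.cons_append]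

lemma pvRot_lt (path : List String) (i j : Nat) (hi : i < path.length) (hj : j < path.length)
    (h : path[i] < path[j]) : pvRot path i < pvRot path j := by
  rw [pvRot_cons path i hi, pvRot_cons path j hj]
  exact List.Lex.rel h

-- B's rotation at an Int index, as written in the port
def pvRotI (path : List String) (i : Int) : List String :=
  PySem.List.slice path (some i) none ++ PySem.List.slice path none (some i)

lemma pvRotI_natCast (path : List String) (k : Nat) : pvRotI path (k : Int) = pvRot path k := by
  simp [pvRotI, pvRot, PySem.List.slice_from_natCast, PySem.List.slice_to_natCast]

-- the fold never loses a some-accumulator and only improves it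
lemma pvFold_le (path : List String) (smallest : String) :
    ∀ (l : List (Int × String)) (a : List String),
      ∃ b, l.foldl (pvBStep path smallest) (some a) = some b ∧ b ≤ a := by
  intro l
  induction l with
  | nil => exact fun a => ⟨a, rfl, le_refl a⟩
  | cons q t ih =>
    intro a
    have hstep : ∃ c, pvBStep path smallest (some a) q = some c ∧ c ≤ a := by
      by_cases hq : q.2 = smallest
      · have hred : pvBStep path smallest (some a) q
            = if pvRotI path q.1 < a then some (pvRotI path q.1) else some a := by
          unfold pvBStep
          rw [if_pos hq]
          rfl
        rw [hred]
        by_cases hlt : pvRotI path q.1 < a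
        · exact ⟨pvRotI path q.1, by rw [if_pos hlt], le_of_lt hlt⟩
        · exact ⟨a, by rw [if_neg hlt], le_refl a⟩
      · exact ⟨a, by unfold pvBStep; rw [if_neg hq], le_refl a⟩
    obtain ⟨c, hc, hca⟩ := hstep
    obtain ⟨b, hb, hbc⟩ := ih c
    exact ⟨b, by simpa [List.foldl_cons, hc] using hb, le_trans hbc hca⟩

-- the fold result is a lower bound of every candidate rotation it saw
lemma pvFold_lb (path : List String) (smallest : String) :
    ∀ (l : List (Int × String)) (acc : Option (List String)) (p : Int × String),
      p ∈ l → p.2 = smallest →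
      ∃ b, l.foldl (pvBStep path smallest) acc = some b ∧ b ≤ pvRotI path p.1 := by
  intro l
  induction l with
  | nil => intro acc p hp; exact absurd hp (List.not_mem_nil)
  | cons q t ih =>
    intro acc p hp hps
    rcases List.mem_cons.mp hp with hpq | hpt
    · subst hpq
      have hstep : ∃ c, pvBStep path smallest acc p = some c ∧ c ≤ pvRotI path p.1 := by
        cases acc with
        | none =>
          exact ⟨pvRotI path p.1, by unfold pvBStep; rw [if_pos hps]; rfl, le_refl _⟩
        | some b0 =>
          have hred : pvBStep path smallest (some b0) p
              = if pvRotI path p.1 < b0 then some (pvRotI path p.1) else some b0 := by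
            unfold pvBStep
            rw [if_pos hps]
            rfl
          rw [hred]
          by_cases hlt : pvRotI path p.1 < b0
          · exact ⟨pvRotI path p.1, by rw [if_pos hlt], le_refl _⟩
          · exact ⟨b0, by rw [if_neg hlt], not_lt.mp hlt⟩
      obtain ⟨c, hc, hcr⟩ := hstep
      obtain ⟨b, hb, hbc⟩ := pvFold_le path smallest t c
      exact ⟨b, by simpa [List.foldl_cons, hc] using hb, le_trans hbc hcr⟩
    · exact ih (pvBStep path smallest acc q) p hpt hps

-- the fold result is either the accumulator or one of the candidate rotations
lemma pvFold_mem (path : List String) (smallest : String) :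
    ∀ (l : List (Int × String)) (acc : Option (List String)) (b : List String),
      l.foldl (pvBStep path smallest) acc = some b →
      acc = some b ∨ ∃ p ∈ l, p.2 = smallest ∧ b = pvRotI path p.1 := by
  intro l
  induction l with
  | nil => intro acc b h; exact Or.inl h
  | cons q t ih =>
    intro acc b h
    rcases ih (pvBStep path smallest acc q) b (by simpa [List.foldl_cons] using h) with hstep | ⟨p, hpt, hps, hbr⟩
    · by_cases hq : q.2 = smallest
      · cases acc with
        | none =>
          have hred : pvBStep path smallest none q = some (pvRotI path q.1) := by
            unfold pvBStep
            rw [if_pos hq]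
            rfl
          rw [hred] at hstep
          exact Or.inr ⟨q, List.mem_cons_self, hq, (Option.some.inj hstep).symm⟩
        | some b0 =>
          have hred : pvBStep path smallest (some b0) q
              = if pvRotI path q.1 < b0 then some (pvRotI path q.1) else some b0 := by
            unfold pvBStep
            rw [if_pos hq]
            rfl
          rw [hred] at hstep
          by_cases hlt : pvRotI path q.1 < b0
          · rw [if_pos hlt] at hstep
            exact Or.inr ⟨q, List.mem_cons_self, hq, (Option.some.inj hstep).symm⟩
          · rw [if_neg hlt] at hstep
            exact Or.inl hstep
      · have hred : pvBStep path smallest acc q = acc := by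
          unfold pvBStep
          rw [if_neg hq]
        rw [hred] at hstep
        exact Or.inl hstep
    · exact Or.inr ⟨p, List.mem_cons_of_mem q hpt, hps, hbr⟩

-- ===== VERDICT (by name: the statement is the Claim_ definition above) =====
theorem normalize_cycle_nodes_py_spec : Claim_equal_normalize_cycle_nodes_py := by
  intro cycle _
  unfold Spec_normalize_cycle_nodes_py normalize_cycle_nodes_py normalize_cycle_nodes_py_alt
  by_cases hlen : cycle.length < 2
  · simp [hlen]
  · simp only [if_neg hlen]
    rw [PySem.List.slice_to_neg_one]
    set path := cycle.dropLast with hpathdef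
    have hn : 0 < path.length := by
      rw [hpathdef, List.length_dropLast]
      omega
    have hne : path ≠ [] := List.ne_nil_of_length_pos hn
    rw [if_neg hne, pvRotations_eq]
    -- A's minimum
    have hrotne : (List.range path.length).map (pvRot path) ≠ [] := by
      intro hcon
      rw [List.map_eq_nil_iff, List.range_eq_nil] at hcon
      exact hne (List.length_eq_zero_iff.mp hcon)
    obtain ⟨rA, hrA⟩ := pvMin_some _ hrotne
    rw [hrA]
    -- the minimal node
    obtain ⟨m0, hm0⟩ := pvMin_some path hne
    rw [hm0]
    have hm0mem : m0 ∈ path := PySem.List.min?_mem hm0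
    have hm0min : ∀ y ∈ path, m0 ≤ y := pvMinStr_isMin hm0
    simp only [Option.getD_some]
    -- B's result
    obtain ⟨k0, hk0, hk0v⟩ := List.mem_iff_getElem.mp hm0mem
    have hk0enum : ((0 : Int) + (k0 : Int), path[k0]) ∈ PySem.List.enumerate path 0 :=
      (PySem.List.mem_enumerate_iff path 0 _).mpr ⟨k0, hk0, rfl⟩
    obtain ⟨b, hb, _⟩ :=
      pvFold_lb path m0 (PySem.List.enumerate path 0) none (((0 : Int) + (k0 : Int), path[k0])) hk0enum (by simpa using hk0v)
    rw [hb, Option.getD_some]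
    -- b is a candidate rotation
    rcases pvFold_mem path m0 (PySem.List.enumerate path 0) none b hb with hcontra | ⟨p, hpmem, hps, hbr⟩
    · exact absurd hcontra (by simp)
    obtain ⟨k1, hk1, hpk1⟩ := (PySem.List.mem_enumerate_iff path 0 p).mp hpmem
    have hbrot : b = pvRot path k1 := by
      rw [hbr, hpk1]
      simpa using pvRotI_natCast path k1
    have hk1v : path[k1] = m0 := by
      have := hps
      rw [hpk1] at this
      exact this
    -- rA ≤ b : b is one of A's rotations
    have hAleB : rA ≤ b := by
      apply pvMin_isMin hrA
      rw [hbrot]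
      exact List.mem_map.mpr ⟨k1, List.mem_range.mpr hk1, rfl⟩
    -- b ≤ rA : rA is some rotation; candidates are handled by pvFold_lb, the rest start strictly above m0
    have hBleA : b ≤ rA := by
      obtain ⟨j, hjmem, hjrot⟩ := List.mem_map.mp (PySem.List.min?_mem hrA)
      have hj : j < path.length := List.mem_range.mp hjmem
      by_cases hjm : path[j] = m0
      · have hjenum : ((0 : Int) + (j : Int), path[j]) ∈ PySem.List.enumerate path 0 :=
          (PySem.List.mem_enumerate_iff path 0 _).mpr ⟨j, hj, rfl⟩
        obtain ⟨b', hb', hb'le⟩ :=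
          pvFold_lb path m0 (PySem.List.enumerate path 0) none _ hjenum (by simpa using hjm)
        have hbb' : b = b' := Option.some.inj (hb.symm.trans hb')
        rw [hbb', ← hjrot]
        calc b' ≤ pvRotI path ((0 : Int) + (j : Int)) := hb'le
          _ = pvRot path j := by simpa using pvRotI_natCast path j
      · have hlt : m0 < path[j] := lt_of_le_of_ne (hm0min _ (List.getElem_mem hj)) (Ne.symm hjm)
        have : pvRot path k1 < pvRot path j := by
          apply pvRot_lt path k1 j hk1 hj
          rw [hk1v]
          exact hlt
        rw [hbrot, ← hjrot]
        exact le_of_lt this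
    exact le_antisymm hAleB hBleA
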